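-- pv_equiv track=rewrite | github.com/arvinnick/asgnm_pt2 | find_min_pledge.py | find_min_pledge
-- ===== SOURCE A (Python) =====
-- def find_min_pledge(pledge_list):
--     """
--     returns the minimum amount which has not been pledged yet
--     :param pledge_list: the list of previously pledged amounts
--     """
--     assert max(pledge_list) < 1000000, "maximum pledged amount should be less than 1000000"
--     assert len(pledge_list) < 100000, "number of pledges should be less than 10000"
--     pledge_list_c = pledge_list.copy()
--     pledge_list_c.sort()
--     for x in pledge_list_c:
--         if not x + 1 in pledge_list_c and x > 0:
--             return x + 1
--     return 1
-- ===== SOURCE B (Python) =====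
-- def find_min_pledge(pledge_list):
--     """
--     returns the minimum amount which has not been pledged yet
--     :param pledge_list: the list of previously pledged amounts
--     """
--     assert max(pledge_list) < 1000000, "maximum pledged amount should be less than 1000000"
--     assert len(pledge_list) < 100000, "number of pledges should be less than 10000"
--     s = set(pledge_list)
--     return min((x + 1 for x in s if x > 0 and x + 1 not in s), default=1)
-- ===== Notes on version B (the rewrite author's own statement) =====
-- stated objective: simpler
-- what changed: Replaces copy+sort+first-match scan (with a linear list-membership test inside the loop) by a set and a single min reduction over the candidate successors x+1 with x>0 and x+1 missing; no sorting and no order-dependent scan remain.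
-- outside the precondition, e.g. on find_min_pledge([]): A raises ValueError, B raises ValueError
import Mathlib
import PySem

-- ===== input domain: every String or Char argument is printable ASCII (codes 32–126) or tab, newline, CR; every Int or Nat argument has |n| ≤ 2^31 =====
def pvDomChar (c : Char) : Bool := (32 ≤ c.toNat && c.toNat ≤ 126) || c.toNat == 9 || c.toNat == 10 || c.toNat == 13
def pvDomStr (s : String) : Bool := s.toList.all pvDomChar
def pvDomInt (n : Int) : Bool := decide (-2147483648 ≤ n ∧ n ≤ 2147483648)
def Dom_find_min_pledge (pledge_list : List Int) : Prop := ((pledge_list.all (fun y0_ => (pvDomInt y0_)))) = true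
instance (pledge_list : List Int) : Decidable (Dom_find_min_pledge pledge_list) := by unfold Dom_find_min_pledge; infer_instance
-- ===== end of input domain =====

-- B drops the sort and the first-match scan of A: it builds a set and takes min over the
-- candidate successors (simpler, one reduction instead of sort + ordered scan).

-- ===== PORT A =====
-- the for-loop over the sorted copy: membership is tested against the sorted copy c
def pvLoopA (c : List Int) : List Int → Int
  | [] => 1
  | x :: rest => if !(c.contains (x + 1)) && decide (x > 0) then x + 1 else pvLoopA c rest

def find_min_pledge (pledge_list : List Int) : Int :=
  let c := PySem.List.sorted pledge_list (fun x => x) false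
  pvLoopA c c

-- ===== PORT B =====
def find_min_pledge_alt (pledge_list : List Int) : Int :=
  let s := PySem.Set.ofList pledge_list
  let cands := (s.filter (fun x => decide (x > 0) && !(s.contains (x + 1)))).map (fun x => x + 1)
  match PySem.List.min? cands (fun x => x) with
  | some m => m
  | none => 1

-- ===== PRECONDITION & SPEC =====
-- Pre_ excludes exactly the inputs on which Python A raises: the empty list (max([]) is a
-- ValueError) and lists violating one of the two asserts (AssertionError); B raises there too.
def Pre_find_min_pledge (pledge_list : List Int) : Prop :=
  pledge_list ≠ [] ∧ (∀ x ∈ pledge_list, x < 1000000) ∧ pledge_list.length < 100000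
instance (pledge_list : List Int) : Decidable (Pre_find_min_pledge pledge_list) := by
  unfold Pre_find_min_pledge; infer_instance
def pvWitness_find_min_pledge : List Int := [3, 1, 1, -2]

def Spec_find_min_pledge (pledge_list : List Int) (out : Int) : Prop := out = find_min_pledge_alt pledge_list
instance (pledge_list : List Int) (out : Int) : Decidable (Spec_find_min_pledge pledge_list out) := by unfold Spec_find_min_pledge; infer_instance

-- ===== CLAIM (what is proved, stated in full; the proofs are below) =====
def Claim_equal_find_min_pledge : Prop := ∀ (pledge_list : List Int), Dom_find_min_pledge pledge_list → Pre_find_min_pledge pledge_list → Spec_find_min_pledge pledge_list (find_min_pledge pledge_list)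

-- ===== LEMMAS AND PROOFS =====

-- A's loop returns (first match)+1, i.e. find? on the scanned list
theorem pvLoopA_eq_find? (c l : List Int) :
    pvLoopA c l = match l.find? (fun x => !(c.contains (x + 1)) && decide (x > 0)) with
      | some x => x + 1
      | none => 1 := by
  induction l with
  | nil => rfl
  | cons x rest ih =>
    by_cases hm : x + 1 ∈ c <;> by_cases hp : 0 < x <;>
      simp [pvLoopA, List.find?, hm, hp, ih]

-- the two ports agree on every list (Pre_ is only about where Python A returns at all)
theorem pv_agree (L : List Int) : find_min_pledge L = find_min_pledge_alt L := by
  unfold find_min_pledge find_min_pledge_alt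
  rw [pvLoopA_eq_find?]
  set S := PySem.List.sorted L (fun x => x) false with hS
  set D := PySem.Set.ofList L with hD
  have hmemS : ∀ x : Int, x ∈ S ↔ x ∈ L := fun x => PySem.List.mem_sorted L _ false x
  have hmemD : ∀ x : Int, x ∈ D ↔ x ∈ L := fun x => by
    rw [hD, ← PySem.List.dedup_eq_ofList]; exact PySem.List.mem_dedup L x
  -- both loop conditions are the one predicate q
  have hqA : (fun x : Int => !(S.contains (x + 1)) && decide (x > 0))
      = (fun x : Int => !(decide ((x + 1) ∈ L)) && decide (0 < x)) := by
    funext x; by_cases h : (x + 1) ∈ L <;> simp [h, hmemS]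
  have hqB : (fun x : Int => decide (x > 0) && !(D.contains (x + 1)))
      = (fun x : Int => !(decide ((x + 1) ∈ L)) && decide (0 < x)) := by
    funext x; by_cases h : (x + 1) ∈ L <;> by_cases h2 : 0 < x <;> simp [h, h2, hmemD]
  simp only [hqA, hqB]
  rw [← List.head?_filter]
  set q : Int → Bool := fun x : Int => !(decide ((x + 1) ∈ L)) && decide (0 < x) with hq
  have hmemF : ∀ y : Int, y ∈ S.filter q ↔ y ∈ L ∧ q y = true := by
    intro y; rw [List.mem_filter, hmemS]
  have hmemG : ∀ y : Int, y ∈ D.filter q ↔ y ∈ L ∧ q y = true := by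
    intro y; rw [List.mem_filter, hmemD]
  cases hF : S.filter q with
  | nil =>
    have hG : D.filter q = [] := by
      cases hG : D.filter q with
      | nil => rfl
      | cons z t =>
        exfalso
        have hz : z ∈ L ∧ q z = true := by rw [← hmemG]; rw [hG]; exact List.mem_cons_self
        have : z ∈ S.filter q := (hmemF z).mpr hz
        rw [hF] at this; exact (List.not_mem_nil) this
    rw [hG]
    simp
    rw [(PySem.List.min?_eq_none_iff ([] : List Int) (fun x => x)).mpr rfl]
  | cons f t =>
    -- A returns f + 1; f is minimal among elements of L satisfying q
    have hpair : (S.filter q).Pairwise (fun a b => a ≤ b) :=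
      (PySem.List.sorted_pairwise L (fun x => x)).filter q
    have hfmin : ∀ y : Int, y ∈ L → q y = true → f ≤ y := by
      intro y hyL hyq
      have hyF : y ∈ S.filter q := (hmemF y).mpr ⟨hyL, hyq⟩
      rw [hF] at hyF
      rcases List.mem_cons.mp hyF with h | h
      · exact le_of_eq h.symm
      · rw [hF] at hpair
        exact (List.pairwise_cons.mp hpair).1 y h
    have hfF : f ∈ S.filter q := by rw [hF]; exact List.mem_cons_self
    have hf : f ∈ L ∧ q f = true := (hmemF f).mp hfF
    have hfC : f + 1 ∈ (D.filter q).map (fun x => x + 1) :=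
      List.mem_map.mpr ⟨f, (hmemG f).mpr hf, rfl⟩
    cases hm : PySem.List.min? ((D.filter q).map (fun x => x + 1)) (fun x => x) with
    | none =>
      exfalso
      rw [PySem.List.min?_eq_none_iff] at hm
      rw [hm] at hfC; exact (List.not_mem_nil) hfC
    | some m =>
      have hmC := PySem.List.min?_mem hm
      rcases List.mem_map.mp hmC with ⟨z, hzG, hzm⟩
      have hz : z ∈ L ∧ q z = true := (hmemG z).mp hzG
      have h1 : f + 1 ≤ m := by
        have := hfmin z hz.1 hz.2; omega
      have h2 : m ≤ f + 1 := PySem.List.min?_isMin hm (f + 1) hfC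
      simp only [List.head?_cons]
      exact le_antisymm h1 h2

-- ===== VERDICT (by name: the statement is the Claim_ definition above) =====
theorem find_min_pledge_spec : Claim_equal_find_min_pledge := by
  intro L _ _
  unfold Spec_find_min_pledge
  exact pv_agree L
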